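-- pv_equiv track=rewrite | github.com/Mashi007/pagos | backend/app/api/v1/endpoints/comparative_analysis.py | _analyze_user_patterns
-- ===== SOURCE A (Python) =====
-- from typing import Any, Dict, List
--
-- def _analyze_user_patterns(
--     user_data_list: List[Dict[str, Any]]
-- ) -> Dict[str, Any]:
--     """Analizar patrones de usuarios"""
--     patterns = {
--         "active_users": len(
--             [u for u in user_data_list if u.get("is_active", False)]
--         ),
--         "admin_users": len(
--             [u for u in user_data_list if u.get("is_admin", False)]
--         ),
--         "total_users": len(user_data_list),
--     }
--     return patterns
-- ===== SOURCE B (Python) =====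
-- from typing import Any, Dict, List
--
-- def _analyze_user_patterns(
--     user_data_list: List[Dict[str, Any]]
-- ) -> Dict[str, Any]:
--     """Analizar patrones de usuarios via a flag-combination histogram"""
--     freq: Dict[tuple, int] = {}
--     for u in user_data_list:
--         key = (bool(u.get("is_active", False)), bool(u.get("is_admin", False)))
--         freq[key] = freq.get(key, 0) + 1
--     return {
--         "active_users": freq.get((True, True), 0) + freq.get((True, False), 0),
--         "admin_users": freq.get((True, True), 0) + freq.get((False, True), 0),
--         "total_users": len(user_data_list),
--     }
-- ===== Notes on version B (the rewrite author's own statement) =====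
-- stated objective: alternative
-- what changed: Instead of A's two filtered list comprehensions, B builds a histogram (dict counter) keyed by the (is_active, is_admin) flag combination of each user and derives the active/admin counts arithmetically from the four histogram buckets.
import Mathlib
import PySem

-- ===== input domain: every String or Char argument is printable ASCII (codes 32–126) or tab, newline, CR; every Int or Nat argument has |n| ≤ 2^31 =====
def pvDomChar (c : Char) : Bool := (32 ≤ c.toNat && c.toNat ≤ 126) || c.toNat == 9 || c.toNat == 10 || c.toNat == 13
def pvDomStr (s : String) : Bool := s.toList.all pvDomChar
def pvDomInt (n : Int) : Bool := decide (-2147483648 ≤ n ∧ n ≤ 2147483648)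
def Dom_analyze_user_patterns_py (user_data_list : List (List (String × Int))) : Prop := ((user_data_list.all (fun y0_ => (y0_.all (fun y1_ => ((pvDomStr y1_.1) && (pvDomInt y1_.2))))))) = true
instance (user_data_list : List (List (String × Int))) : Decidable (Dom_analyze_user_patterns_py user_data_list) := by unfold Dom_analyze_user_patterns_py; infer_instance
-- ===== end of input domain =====

-- ===== PORT A =====
-- One honest line: B builds a histogram keyed by the (is_active, is_admin) flag pair and
-- sums its buckets, instead of A's two filtered list comprehensions; same return value.

-- u.get(k, False): first-match association-list lookup, default 0 (False); truthy ↔ ≠ 0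
def pvGetTruthy (u : List (String × Int)) (k : String) : Bool :=
  ((u.lookup k).getD 0) != 0

def analyze_user_patterns_py (user_data_list : List (List (String × Int))) : List (String × Int) :=
  [("active_users", ((user_data_list.filter (fun u => pvGetTruthy u "is_active")).length : Int)),
   ("admin_users",  ((user_data_list.filter (fun u => pvGetTruthy u "is_admin")).length : Int)),
   ("total_users",  (user_data_list.length : Int))]

-- ===== PORT B =====
-- the histogram key: (bool(u.get("is_active", False)), bool(u.get("is_admin", False)))
def pvKeyOf (u : List (String × Int)) : Bool × Bool :=
  (pvGetTruthy u "is_active", pvGetTruthy u "is_admin")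

def analyze_user_patterns_py_alt (user_data_list : List (List (String × Int))) : List (String × Int) :=
  let freq := user_data_list.foldl
    (fun (d : PySem.Dict (Bool × Bool) Int) u =>
      d.insert (pvKeyOf u) (d.getD (pvKeyOf u) 0 + 1))
    PySem.Dict.empty
  [("active_users", freq.getD (true, true) 0 + freq.getD (true, false) 0),
   ("admin_users",  freq.getD (true, true) 0 + freq.getD (false, true) 0),
   ("total_users",  (user_data_list.length : Int))]

-- ===== PRECONDITION & SPEC =====
def Spec_analyze_user_patterns_py (user_data_list : List (List (String × Int))) (out : List (String × Int)) : Prop := out = analyze_user_patterns_py_alt user_data_list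
instance (user_data_list : List (List (String × Int))) (out : List (String × Int)) : Decidable (Spec_analyze_user_patterns_py user_data_list out) := by unfold Spec_analyze_user_patterns_py; infer_instance

-- ===== CLAIM (what is proved, stated in full; the proofs are below) =====
def Claim_equal_analyze_user_patterns_py : Prop := ∀ (user_data_list : List (List (String × Int))), Dom_analyze_user_patterns_py user_data_list → Spec_analyze_user_patterns_py user_data_list (analyze_user_patterns_py user_data_list)

-- ===== LEMMAS AND PROOFS =====

-- B's histogram lookup is the multiset count of the key among the users' flag pairs
lemma pv_getD_freq (l : List (List (String × Int))) (k : Bool × Bool) :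
    (l.foldl (fun (d : PySem.Dict (Bool × Bool) Int) u =>
        d.insert (pvKeyOf u) (d.getD (pvKeyOf u) 0 + 1)) PySem.Dict.empty).getD k 0
      = ((l.map pvKeyOf).count k : Int) := by
  have h := List.foldl_map (l := l) (f := pvKeyOf)
    (g := fun (d : PySem.Dict (Bool × Bool) Int) k => d.insert k (d.getD k 0 + 1))
    (init := PySem.Dict.empty)
  rw [← h, PySem.Dict.getD_foldl_insert_add_one]
  simp

-- the filtered count of a flag equals the sum of the two histogram buckets where it is set
lemma pv_active_eq_counts (l : List (List (String × Int))) :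
    ((l.filter (fun u => pvGetTruthy u "is_active")).length : Int)
      = ((l.map pvKeyOf).count (true, true) : Int) + ((l.map pvKeyOf).count (true, false) : Int) := by
  induction l with
  | nil => simp
  | cons x xs ih =>
    simp only [List.filter_cons, List.map_cons, List.count_cons]
    rcases hk : pvKeyOf x with ⟨a, d⟩
    have ha : pvGetTruthy x "is_active" = a := congrArg Prod.fst hk
    cases a <;> cases d <;> simp_all <;> omega

lemma pv_admin_eq_counts (l : List (List (String × Int))) :
    ((l.filter (fun u => pvGetTruthy u "is_admin")).length : Int)
      = ((l.map pvKeyOf).count (true, true) : Int) + ((l.map pvKeyOf).count (false, true) : Int) := by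
  induction l with
  | nil => simp
  | cons x xs ih =>
    simp only [List.filter_cons, List.map_cons, List.count_cons]
    rcases hk : pvKeyOf x with ⟨a, d⟩
    have ha : pvGetTruthy x "is_admin" = d := congrArg Prod.snd hk
    cases a <;> cases d <;> simp_all <;> omega

-- ===== VERDICT (by name: the statement is the Claim_ definition above) =====
theorem analyze_user_patterns_py_spec : Claim_equal_analyze_user_patterns_py := by
  intro l _
  unfold Spec_analyze_user_patterns_py analyze_user_patterns_py analyze_user_patterns_py_alt
  dsimp only
  rw [pv_getD_freq, pv_getD_freq, pv_getD_freq,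
      pv_active_eq_counts l, pv_admin_eq_counts l]
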